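-- pv_equiv track=rewrite | github.com/pypi-data/pypi-mirror-32 | packages/aws-vapor/aws_vapor-0.1.0-py3-none-any.whl/aws_vapor/utils.py | _replace_params
-- ===== SOURCE A (Python) =====
-- from typing import List, Tuple
--
-- def _replace_params(line: str, params: dict) -> List[str]:
--     for k, v in list(params.items()):
--         key = '{{ %s }}' % k
--         if line.find(key) != -1:
--             pos = line.index(key)
--             l_line = line[:pos]
--             r_line = line[pos + len(key):]
--             return _replace_params(l_line, params) + [v] + _replace_params(r_line, params)
--     return [line]
-- ===== SOURCE B (Python) =====
-- from typing import List
--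
--
-- def _replace_params(line: str, params: dict) -> List[str]:
--     out = []
--     stack = [(False, line)]  # (resolved?, payload); top of stack = end of list
--     while stack:
--         resolved, item = stack.pop()
--         if resolved:
--             out.append(item)
--             continue
--         for k, v in params.items():
--             key = '{{ %s }}' % k
--             if key in item:
--                 i = item.index(key)
--                 stack.append((False, item[i + len(key):]))
--                 stack.append((True, v))
--                 stack.append((False, item[:i]))
--                 break
--         else:
--             out.append(item)
--     return out
-- ===== Notes on version B (the rewrite author's own statement) =====
-- stated objective: alternative
-- what changed: Replaces the tree recursion with an explicit work-stack loop over tagged items (unprocessed string vs resolved value) that appends to a single output accumulator, keeping the same dict-order key selection and split points.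
import Mathlib
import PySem

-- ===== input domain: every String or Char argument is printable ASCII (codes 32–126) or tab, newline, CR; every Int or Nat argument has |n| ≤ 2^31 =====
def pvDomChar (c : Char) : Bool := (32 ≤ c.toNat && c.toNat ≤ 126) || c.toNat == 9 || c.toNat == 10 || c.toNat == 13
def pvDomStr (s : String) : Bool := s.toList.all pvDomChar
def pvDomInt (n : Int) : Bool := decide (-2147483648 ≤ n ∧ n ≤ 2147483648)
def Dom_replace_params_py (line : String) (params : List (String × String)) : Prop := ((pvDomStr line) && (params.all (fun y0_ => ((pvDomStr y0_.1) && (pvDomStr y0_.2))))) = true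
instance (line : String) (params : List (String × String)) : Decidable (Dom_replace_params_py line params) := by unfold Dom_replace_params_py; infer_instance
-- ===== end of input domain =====

-- B rewrites A's tree recursion as an explicit tagged work-stack loop with one output accumulator (objective: alternative; same cost class).

-- ===== PORT A =====
-- '{{ %s }}' % k
def pvKey (k : List Char) : List Char := '{' :: '{' :: ' ' :: (k ++ [' ', '}', '}'])

-- A's for-loop over params.items(): first (k, v) with line.find(key) != -1, returned as (key, v)
def pvScanA (line : List Char) : List (String × String) → Option (List Char × String)
  | [] => none
  | (k, v) :: rest =>
      let key := pvKey k.toList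
      if PySem.Chars.find line key ≠ -1 then some (key, v) else pvScanA line rest

-- needed by replace_params_py's decreasing_by (the scan succeeded, so the key occurs in line)
theorem pvScanA_found (line : List Char) (params : List (String × String)) (key : List Char)
    (v : String) (h : pvScanA line params = some (key, v)) :
    PySem.Chars.find line key ≠ -1 ∧ 6 ≤ key.length := by
  induction params with
  | nil => simp [pvScanA] at h
  | cons p rest ih =>
      obtain ⟨k, w⟩ := p
      simp only [pvScanA] at h
      split at h
      · next hfind =>
          injection h with h'
          injection h' with h1 h2
          subst h1; subst h2
          exact ⟨hfind, by simp [pvKey]⟩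
      · exact ih h

theorem pvFound_bounds (line key : List Char) (h : PySem.Chars.find line key ≠ -1) :
    (PySem.Chars.find line key).toNat + key.length ≤ line.length ∧ 0 ≤ PySem.Chars.find line key := by
  have h0 : 0 ≤ PySem.Chars.find line key :=
    (PySem.Chars.find_nonneg_iff line key).mpr ((PySem.Chars.find_ne_neg_one_iff line key).mp h)
  have hs := (PySem.Chars.find_spec h0).1
  have := hs.length_le
  simp only [List.length_drop] at this
  have hle : PySem.Chars.find line key ≤ (line.length : Int) := PySem.Chars.find_le_length line key
  constructor
  · omega
  · exact h0

-- recursive body of _replace_params, on List Char (values kept as List Char; wrapped below)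
def pvReplaceA (line : List Char) (params : List (String × String)) : List (List Char) :=
  match h : pvScanA line params with
  | none => [line]
  | some (key, v) =>
      -- pos = line.index(key) (= find, which is ≠ -1 here)
      let pos : Nat := (PySem.Chars.find line key).toNat
      pvReplaceA (PySem.List.slice line none (some (pos : Int))) params
        ++ [v.toList]
        ++ pvReplaceA (PySem.List.slice line (some ((pos : Int) + key.length)) none) params
termination_by line.length
decreasing_by
  · have hf := pvScanA_found line params key v h
    have hb := pvFound_bounds line key hf.1
    rw [PySem.List.slice_to line (by omega : (0:Int) ≤ ((PySem.Chars.find line key).toNat : Int))]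
    simp only [List.length_take]
    omega
  · have hf := pvScanA_found line params key v h
    have hb := pvFound_bounds line key hf.1
    rw [PySem.List.slice_from line (by omega : (0:Int) ≤ ((PySem.Chars.find line key).toNat : Int) + key.length)]
    simp only [List.length_drop]
    omega

def replace_params_py (line : String) (params : List (String × String)) : List String :=
  (pvReplaceA line.toList params).map String.ofList

-- ===== PORT B =====
-- B's inner for-loop: first (k, v) with 'key in item'
def pvScanB (item : List Char) : List (String × String) → Option (List Char × String)
  | [] => none
  | (k, v) :: rest =>
      let key := pvKey k.toList
      if PySem.Chars.isIn key item then some (key, v) else pvScanB item rest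

-- needed by pvLoop's decreasing_by
theorem pvScanB_found (item : List Char) (params : List (String × String)) (key : List Char)
    (v : String) (h : pvScanB item params = some (key, v)) :
    PySem.Chars.find item key ≠ -1 ∧ 6 ≤ key.length := by
  induction params with
  | nil => simp [pvScanB] at h
  | cons p rest ih =>
      obtain ⟨k, w⟩ := p
      simp only [pvScanB] at h
      split at h
      · next hin =>
          injection h with h'
          injection h' with h1 h2
          subst h1; subst h2
          exact ⟨(PySem.Chars.find_ne_neg_one_iff ..).mpr ((PySem.Chars.isIn_iff_infix ..).mp hin),
            by simp [pvKey]⟩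
      · exact ih h

def pvStackMeasure (st : List (Bool × List Char)) : Nat :=
  (st.map (fun it => if it.1 then 1 else it.2.length + 1)).sum

-- the while-loop over the work stack (list head = top of stack)
def pvLoop (params : List (String × String)) :
    List (Bool × List Char) → List (List Char) → List (List Char)
  | [], out => out
  | (true, v) :: st, out => pvLoop params st (out ++ [v])
  | (false, s) :: st, out =>
      match h : pvScanB s params with
      | none => pvLoop params st (out ++ [s])
      | some (key, v) =>
          let i : Nat := (PySem.Chars.find s key).toNat
          pvLoop params
            ((false, s.take i) :: (true, v.toList) :: (false, s.drop (i + key.length)) :: st)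
            out
termination_by st _ => pvStackMeasure st
decreasing_by
  · simp [pvStackMeasure]
  · simp [pvStackMeasure]
  · have hf := pvScanB_found s params key v h
    have hb := pvFound_bounds s key hf.1
    simp [pvStackMeasure]
    omega

def replace_params_py_alt (line : String) (params : List (String × String)) : List String :=
  (pvLoop params [(false, line.toList)] []).map String.ofList

-- ===== PRECONDITION & SPEC =====
def Spec_replace_params_py (line : String) (params : List (String × String)) (out : List String) : Prop := out = replace_params_py_alt line params
instance (line : String) (params : List (String × String)) (out : List String) : Decidable (Spec_replace_params_py line params out) := by unfold Spec_replace_params_py; infer_instance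

-- ===== CLAIM (what is proved, stated in full; the proofs are below) =====
def Claim_equal_replace_params_py : Prop := ∀ (line : String) (params : List (String × String)), Dom_replace_params_py line params → Spec_replace_params_py line params (replace_params_py line params)

-- ===== LEMMAS AND PROOFS =====

-- the two param scans agree ('find != -1' vs 'key in item')
theorem pvScan_eq (item : List Char) (params : List (String × String)) :
    pvScanB item params = pvScanA item params := by
  induction params with
  | nil => rfl
  | cons p rest ih =>
      obtain ⟨k, w⟩ := p
      simp only [pvScanA, pvScanB, ih]
      congr 1
      simp [PySem.Chars.isIn_iff_infix, PySem.Chars.find_ne_neg_one_iff]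

theorem pvReplaceA_none (line : List Char) (params : List (String × String))
    (h : pvScanA line params = none) : pvReplaceA line params = [line] := by
  rw [pvReplaceA]; split <;> simp_all

theorem pvReplaceA_some (line : List Char) (params : List (String × String)) (key : List Char)
    (v : String) (h : pvScanA line params = some (key, v)) :
    pvReplaceA line params =
      pvReplaceA (line.take (PySem.Chars.find line key).toNat) params
        ++ [v.toList]
        ++ pvReplaceA (line.drop ((PySem.Chars.find line key).toNat + key.length)) params := by
  rw [pvReplaceA]
  split
  · simp_all
  · next key' v' h' =>
      rw [h] at h'
      injection h' with h''
      injection h'' with h1 h2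
      subst h1; subst h2
      show pvReplaceA (PySem.List.slice line none (some (((PySem.Chars.find line key).toNat : Nat) : Int))) params
            ++ [v.toList]
            ++ pvReplaceA (PySem.List.slice line (some ((((PySem.Chars.find line key).toNat : Nat) : Int) + key.length))) params
          = _
      rw [PySem.List.slice_to line (by omega : (0:Int) ≤ ((PySem.Chars.find line key).toNat : Int)),
        PySem.List.slice_from line
          (by omega : (0:Int) ≤ ((PySem.Chars.find line key).toNat : Int) + key.length)]
      rw [show (((PySem.Chars.find line key).toNat : Int)).toNat
            = (PySem.Chars.find line key).toNat from by omega,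
        show ((((PySem.Chars.find line key).toNat : Int)) + (key.length : Int)).toNat
            = (PySem.Chars.find line key).toNat + key.length from by omega]

-- one-step unfoldings of pvLoop (a while-loop iteration)
theorem pvLoop_nil (params : List (String × String)) (out : List (List Char)) :
    pvLoop params [] out = out := by
  rw [pvLoop]

theorem pvLoop_val (params : List (String × String)) (v : List Char)
    (st : List (Bool × List Char)) (out : List (List Char)) :
    pvLoop params ((true, v) :: st) out = pvLoop params st (out ++ [v]) := by
  rw [pvLoop]

theorem pvLoop_none (params : List (String × String)) (s : List Char)
    (st : List (Bool × List Char)) (out : List (List Char)) (h : pvScanB s params = none) :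
    pvLoop params ((false, s) :: st) out = pvLoop params st (out ++ [s]) := by
  rw [pvLoop]
  split <;> simp_all

theorem pvLoop_some (params : List (String × String)) (s : List Char)
    (st : List (Bool × List Char)) (out : List (List Char)) (key : List Char) (v : String)
    (h : pvScanB s params = some (key, v)) :
    pvLoop params ((false, s) :: st) out =
      pvLoop params
        ((false, s.take (PySem.Chars.find s key).toNat) :: (true, v.toList) ::
          (false, s.drop ((PySem.Chars.find s key).toNat + key.length)) :: st) out := by
  rw [pvLoop]
  split
  · simp_all
  · next key' v' h' =>
      rw [h] at h'
      injection h' with h''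
      injection h'' with h1 h2
      subst h1; subst h2
      rfl

-- loop invariant: pvLoop flushes the stack as A's recursion would, left of the accumulator
theorem pvLoop_eq (params : List (String × String)) (st : List (Bool × List Char))
    (out : List (List Char)) :
    pvLoop params st out =
      out ++ (st.map (fun it => if it.1 then [it.2] else pvReplaceA it.2 params)).flatten := by
  induction st, out using pvLoop.induct params with
  | case1 out => simp [pvLoop_nil]
  | case2 v st out ih => rw [pvLoop_val, ih]; simp
  | case3 s st out h ih =>
      rw [pvLoop_none params s st out h, ih]
      simp [pvReplaceA_none s params (pvScan_eq s params ▸ h)]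
  | case4 s st out key v h i ih =>
      rw [pvLoop_some params s st out key v h, ih]
      simp [pvReplaceA_some s params key v (pvScan_eq s params ▸ h)]
      rfl

-- ===== VERDICT (by name: the statement is the Claim_ definition above) =====
theorem replace_params_py_spec : Claim_equal_replace_params_py := by
  intro line params _
  show replace_params_py line params = replace_params_py_alt line params
  unfold replace_params_py replace_params_py_alt
  rw [pvLoop_eq]
  simp
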